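-- pv_equiv track=rewrite | github.com/r13ccgmz/bscs3b_resumatch | resumatch/evaluations/evaluator.py | score_education
-- ===== SOURCE A (Python) =====
-- def score_education(education):
--     degree_scores = {
--         'PhD in Computer Science': 100,
--         'PhD in Information Technology': 100,
--         'PhD in Software Engineering': 100,
--         'Doctorate in Computer Science': 100,
--         'Doctorate in Information Technology': 100,
--         'Doctorate in Software Engineering': 100,
--         'Master\'s Degree in Computer Science': 80,
--         'Master\'s Degree in Information Technology': 80,
--         'Master\'s Degree in Software Engineering': 80,
--         'Bachelor\'s Degree in Computer Science': 60,
--         'Bachelor\'s Degree in Information Technology': 60,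
--         'Bachelor\'s Degree in Software Engineering': 60,
--     }
--     degrees = education.get('degrees', [])
--     if not degrees:
--         return 40
--     highest_score = max([degree_scores.get(degree.strip(), 0) for degree in degrees])
--     return highest_score
-- ===== SOURCE B (Python) =====
-- def score_education(education):
--     TIERS = [
--         (100, ('PhD in Computer Science', 'PhD in Information Technology',
--                'PhD in Software Engineering', 'Doctorate in Computer Science',
--                'Doctorate in Information Technology', 'Doctorate in Software Engineering')),
--         (80, ("Master's Degree in Computer Science", "Master's Degree in Information Technology",
--               "Master's Degree in Software Engineering")),
--         (60, ("Bachelor's Degree in Computer Science", "Bachelor's Degree in Information Technology",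
--               "Bachelor's Degree in Software Engineering")),
--     ]
--     degrees = education.get('degrees', [])
--     if not degrees:
--         return 40
--     stripped = {degree.strip() for degree in degrees}
--     for score, names in TIERS:
--         if any(n in stripped for n in names):
--             return score
--     return 0
-- ===== Notes on version B (the rewrite author's own statement) =====
-- stated objective: alternative
-- what changed: B replaces A's per-degree dict scoring plus max over all degrees with a priority-ordered scan over three score tiers against the set of stripped degree names, returning at the first tier that matches (short-circuit) instead of scoring everything.
import Mathlib
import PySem

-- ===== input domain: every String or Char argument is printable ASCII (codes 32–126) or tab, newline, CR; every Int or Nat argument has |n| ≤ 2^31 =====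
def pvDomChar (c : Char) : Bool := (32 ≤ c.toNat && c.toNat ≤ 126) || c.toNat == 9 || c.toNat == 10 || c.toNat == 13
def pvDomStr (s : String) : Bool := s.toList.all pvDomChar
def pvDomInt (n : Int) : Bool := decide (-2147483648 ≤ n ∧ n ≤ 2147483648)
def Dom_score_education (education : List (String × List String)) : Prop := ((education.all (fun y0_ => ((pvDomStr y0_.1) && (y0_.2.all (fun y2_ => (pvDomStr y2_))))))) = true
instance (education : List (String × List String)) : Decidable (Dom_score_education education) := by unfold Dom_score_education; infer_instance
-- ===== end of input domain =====

-- B searches the three score tiers in priority order against the set of stripped degrees,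
-- short-circuiting at the first matching tier, instead of scoring every degree and taking the max.

-- ===== PORT A =====
def eduTable : PySem.Dict String Int := PySem.Dict.mk [
  ("PhD in Computer Science", 100),
  ("PhD in Information Technology", 100),
  ("PhD in Software Engineering", 100),
  ("Doctorate in Computer Science", 100),
  ("Doctorate in Information Technology", 100),
  ("Doctorate in Software Engineering", 100),
  ("Master's Degree in Computer Science", 80),
  ("Master's Degree in Information Technology", 80),
  ("Master's Degree in Software Engineering", 80),
  ("Bachelor's Degree in Computer Science", 60),
  ("Bachelor's Degree in Information Technology", 60),
  ("Bachelor's Degree in Software Engineering", 60)]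

def score_education (education : List (String × List String)) : Int :=
  let degrees := (PySem.Dict.mk education).getD "degrees" []
  if degrees = [] then 40
  else
    -- max([...]) over the (nonempty) list of per-degree scores
    match PySem.List.max? (degrees.map (fun d => eduTable.getD (PySem.Str.strip d) 0)) (fun x => x) with
    | some m => m
    | none => 0   -- unreachable: degrees ≠ []

-- ===== PORT B =====
def phdNames : List String :=
  ["PhD in Computer Science", "PhD in Information Technology",
   "PhD in Software Engineering", "Doctorate in Computer Science",
   "Doctorate in Information Technology", "Doctorate in Software Engineering"]
def masterNames : List String :=
  ["Master's Degree in Computer Science", "Master's Degree in Information Technology",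
   "Master's Degree in Software Engineering"]
def bachelorNames : List String :=
  ["Bachelor's Degree in Computer Science", "Bachelor's Degree in Information Technology",
   "Bachelor's Degree in Software Engineering"]

def pvTiers : List (Int × List String) :=
  [(100, phdNames), (80, masterNames), (60, bachelorNames)]

def pvTierScan (stripped : PySem.Set String) : List (Int × List String) → Int
  | [] => 0
  | (score, names) :: rest =>
      if names.any (fun n => PySem.Set.contains stripped n) then score
      else pvTierScan stripped rest

def score_education_alt (education : List (String × List String)) : Int :=
  let degrees := (PySem.Dict.mk education).getD "degrees" []
  if degrees = [] then 40
  else pvTierScan (PySem.Set.ofList (degrees.map PySem.Str.strip)) pvTiers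

-- ===== PRECONDITION & SPEC =====
def Spec_score_education (education : List (String × List String)) (out : Int) : Prop := out = score_education_alt education
instance (education : List (String × List String)) (out : Int) : Decidable (Spec_score_education education out) := by unfold Spec_score_education; infer_instance

-- ===== CLAIM (what is proved, stated in full; the proofs are below) =====
def Claim_equal_score_education : Prop := ∀ (education : List (String × List String)), Dom_score_education education → Spec_score_education education (score_education education)

-- ===== LEMMAS AND PROOFS =====

-- the per-degree score of A's table, written as a 12-way if chain
def tierOf (s : String) : Int :=
  if s = "PhD in Computer Science" then 100
  else if s = "PhD in Information Technology" then 100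
  else if s = "PhD in Software Engineering" then 100
  else if s = "Doctorate in Computer Science" then 100
  else if s = "Doctorate in Information Technology" then 100
  else if s = "Doctorate in Software Engineering" then 100
  else if s = "Master's Degree in Computer Science" then 80
  else if s = "Master's Degree in Information Technology" then 80
  else if s = "Master's Degree in Software Engineering" then 80
  else if s = "Bachelor's Degree in Computer Science" then 60
  else if s = "Bachelor's Degree in Information Technology" then 60
  else if s = "Bachelor's Degree in Software Engineering" then 60
  else 0

set_option maxHeartbeats 1000000 in
theorem eduTable_getD_eq (s : String) : eduTable.getD s 0 = tierOf s := by
  simp only [eduTable, tierOf, PySem.Dict.getD, PySem.Dict.get?_mk_cons, beq_iff_eq]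
  by_cases h0 : s = "PhD in Computer Science"
  · subst h0; decide
  rw [if_neg (fun h => h0 h.symm), if_neg h0]
  by_cases h1 : s = "PhD in Information Technology"
  · subst h1; decide
  rw [if_neg (fun h => h1 h.symm), if_neg h1]
  by_cases h2 : s = "PhD in Software Engineering"
  · subst h2; decide
  rw [if_neg (fun h => h2 h.symm), if_neg h2]
  by_cases h3 : s = "Doctorate in Computer Science"
  · subst h3; decide
  rw [if_neg (fun h => h3 h.symm), if_neg h3]
  by_cases h4 : s = "Doctorate in Information Technology"
  · subst h4; decide
  rw [if_neg (fun h => h4 h.symm), if_neg h4]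
  by_cases h5 : s = "Doctorate in Software Engineering"
  · subst h5; decide
  rw [if_neg (fun h => h5 h.symm), if_neg h5]
  by_cases h6 : s = "Master's Degree in Computer Science"
  · subst h6; decide
  rw [if_neg (fun h => h6 h.symm), if_neg h6]
  by_cases h7 : s = "Master's Degree in Information Technology"
  · subst h7; decide
  rw [if_neg (fun h => h7 h.symm), if_neg h7]
  by_cases h8 : s = "Master's Degree in Software Engineering"
  · subst h8; decide
  rw [if_neg (fun h => h8 h.symm), if_neg h8]
  by_cases h9 : s = "Bachelor's Degree in Computer Science"
  · subst h9; decide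
  rw [if_neg (fun h => h9 h.symm), if_neg h9]
  by_cases h10 : s = "Bachelor's Degree in Information Technology"
  · subst h10; decide
  rw [if_neg (fun h => h10 h.symm), if_neg h10]
  by_cases h11 : s = "Bachelor's Degree in Software Engineering"
  · subst h11; decide
  rw [if_neg (fun h => h11 h.symm), if_neg h11]
  rfl

set_option maxHeartbeats 1000000 in
theorem tierOf_vals (s : String) :
    tierOf s = 100 ∨ tierOf s = 80 ∨ tierOf s = 60 ∨ tierOf s = 0 := by
  unfold tierOf; split_ifs <;> decide

theorem tierOf_of_phd {s : String} (h : s ∈ phdNames) : tierOf s = 100 := by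
  simp only [phdNames, List.mem_cons, List.not_mem_nil, or_false] at h
  rcases h with rfl | rfl | rfl | rfl | rfl | rfl <;> decide

theorem tierOf_of_master {s : String} (h : s ∈ masterNames) : tierOf s = 80 := by
  simp only [masterNames, List.mem_cons, List.not_mem_nil, or_false] at h
  rcases h with rfl | rfl | rfl <;> decide

theorem tierOf_of_bachelor {s : String} (h : s ∈ bachelorNames) : tierOf s = 60 := by
  simp only [bachelorNames, List.mem_cons, List.not_mem_nil, or_false] at h
  rcases h with rfl | rfl | rfl <;> decide

set_option maxHeartbeats 1000000 in
theorem tierOf_of_none {s : String} (h1 : s ∉ phdNames) (h2 : s ∉ masterNames)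
    (h3 : s ∉ bachelorNames) : tierOf s = 0 := by
  unfold tierOf
  split_ifs with g1 g2 g3 g4 g5 g6 g7 g8 g9 g10 g11 g12
  · subst g1; exact absurd (by decide) h1
  · subst g2; exact absurd (by decide) h1
  · subst g3; exact absurd (by decide) h1
  · subst g4; exact absurd (by decide) h1
  · subst g5; exact absurd (by decide) h1
  · subst g6; exact absurd (by decide) h1
  · subst g7; exact absurd (by decide) h2
  · subst g8; exact absurd (by decide) h2
  · subst g9; exact absurd (by decide) h2
  · subst g10; exact absurd (by decide) h3
  · subst g11; exact absurd (by decide) h3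
  · subst g12; exact absurd (by decide) h3
  · rfl

theorem tierOf_eq_100_iff (s : String) : tierOf s = 100 ↔ s ∈ phdNames := by
  by_cases h1 : s ∈ phdNames
  · simp [tierOf_of_phd h1, h1]
  · by_cases h2 : s ∈ masterNames
    · rw [tierOf_of_master h2]; simp [h1]
    · by_cases h3 : s ∈ bachelorNames
      · rw [tierOf_of_bachelor h3]; simp [h1]
      · rw [tierOf_of_none h1 h2 h3]; simp [h1]

theorem tierOf_eq_80_iff (s : String) : tierOf s = 80 ↔ s ∈ masterNames := by
  by_cases h2 : s ∈ masterNames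
  · simp [tierOf_of_master h2, h2]
  · by_cases h1 : s ∈ phdNames
    · rw [tierOf_of_phd h1]; simp [h2]
    · by_cases h3 : s ∈ bachelorNames
      · rw [tierOf_of_bachelor h3]; simp [h2]
      · rw [tierOf_of_none h1 h2 h3]; simp [h2]

theorem tierOf_eq_60_iff (s : String) : tierOf s = 60 ↔ s ∈ bachelorNames := by
  by_cases h3 : s ∈ bachelorNames
  · simp [tierOf_of_bachelor h3, h3]
  · by_cases h1 : s ∈ phdNames
    · rw [tierOf_of_phd h1]; simp [h3]
    · by_cases h2 : s ∈ masterNames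
      · rw [tierOf_of_master h2]; simp [h3]
      · rw [tierOf_of_none h1 h2 h3]; simp [h3]

-- running max of a list of tier values = first tier value present, searched high to low
theorem foldl_max_char (a : Int) (xs : List Int)
    (hall : ∀ y ∈ a :: xs, y = 100 ∨ y = 80 ∨ y = 60 ∨ y = 0) :
    xs.foldl max a =
      if 100 ∈ a :: xs then 100
      else if 80 ∈ a :: xs then 80
      else if 60 ∈ a :: xs then 60 else 0 := by
  obtain ⟨hle, hub⟩ := PySem.List.le_foldl_max xs a
  have hmem : xs.foldl max a ∈ a :: xs := by
    rcases PySem.List.foldl_max_mem xs a with h | h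
    · rw [h]; exact List.mem_cons_self
    · exact List.mem_cons_of_mem _ h
  have hmv := hall _ hmem
  have hub' : ∀ y ∈ a :: xs, y ≤ xs.foldl max a := by
    intro y hy
    rcases List.mem_cons.mp hy with rfl | hy'
    · exact hle
    · exact hub y hy'
  split_ifs with c1 c2 c3
  · have := hub' _ c1; omega
  · have h80 := hub' _ c2
    have : xs.foldl max a ≠ 100 := fun h => c1 (h ▸ hmem)
    omega
  · have h60 := hub' _ c3
    have hn1 : xs.foldl max a ≠ 100 := fun h => c1 (h ▸ hmem)
    have hn2 : xs.foldl max a ≠ 80 := fun h => c2 (h ▸ hmem)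
    omega
  · have hn1 : xs.foldl max a ≠ 100 := fun h => c1 (h ▸ hmem)
    have hn2 : xs.foldl max a ≠ 80 := fun h => c2 (h ▸ hmem)
    have hn3 : xs.foldl max a ≠ 60 := fun h => c3 (h ▸ hmem)
    omega

-- B's tier condition expressed as membership of a score in the mapped score list
theorem tier_cond_iff (S : List String) (names : List String) (v : Int)
    (hfwd : ∀ s ∈ names, tierOf s = v) (hbwd : ∀ s, tierOf s = v → s ∈ names) :
    (names.any (fun n => PySem.Set.contains (PySem.Set.ofList S) n) = true) ↔
      v ∈ S.map tierOf := by
  simp only [List.any_eq_true, PySem.Set.contains_iff, PySem.Set.mem_ofList, List.mem_map]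
  constructor
  · rintro ⟨n, hn, hnS⟩
    exact ⟨n, hnS, hfwd n hn⟩
  · rintro ⟨s, hsS, hsv⟩
    exact ⟨s, hbwd s hsv, hsS⟩

theorem score_education_spec : Claim_equal_score_education := by
  intro education _
  unfold Spec_score_education score_education score_education_alt
  cases hdeg : (PySem.Dict.mk education).getD "degrees" [] with
  | nil => simp
  | cons d t =>
      simp only [if_neg (by simp : ¬ (d :: t : List String) = [])]
      -- rewrite A's scores through the tier table
      have hmap : (d :: t).map (fun x => eduTable.getD (PySem.Str.strip x) 0)
          = ((d :: t).map PySem.Str.strip).map tierOf := by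
        simp [List.map_map, Function.comp, eduTable_getD_eq]
      rw [hmap]
      set S : List String := (d :: t).map PySem.Str.strip with hS
      have hScons : S = PySem.Str.strip d :: t.map PySem.Str.strip := by simp [hS]
      rw [hScons]
      simp only [List.map_cons]
      rw [PySem.List.max?_id_cons]
      rw [foldl_max_char (tierOf (PySem.Str.strip d)) ((t.map PySem.Str.strip).map tierOf)
        (by
          intro y hy
          rcases List.mem_cons.mp hy with rfl | hy'
          · exact tierOf_vals _
          · obtain ⟨s, _, rfl⟩ := List.mem_map.mp hy'
            exact tierOf_vals s)]
      -- unfold B's tier scan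
      simp only [pvTiers, pvTierScan]
      rw [show (tierOf (PySem.Str.strip d) :: (t.map PySem.Str.strip).map tierOf)
            = ((PySem.Str.strip d :: t.map PySem.Str.strip).map tierOf) from rfl,
          show (PySem.Str.strip d :: t.map PySem.Str.strip) = S from hScons.symm]
      have c100 := tier_cond_iff S phdNames 100 (fun s h => tierOf_of_phd h)
        (fun s h => (tierOf_eq_100_iff s).mp h)
      have c80 := tier_cond_iff S masterNames 80 (fun s h => tierOf_of_master h)
        (fun s h => (tierOf_eq_80_iff s).mp h)
      have c60 := tier_cond_iff S bachelorNames 60 (fun s h => tierOf_of_bachelor h)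
        (fun s h => (tierOf_eq_60_iff s).mp h)
      by_cases h1 : 100 ∈ S.map tierOf
      · rw [if_pos h1, if_pos (c100.mpr h1)]
      · rw [if_neg h1, if_neg (fun hc => h1 (c100.mp hc))]
        by_cases h2 : 80 ∈ S.map tierOf
        · rw [if_pos h2, if_pos (c80.mpr h2)]
        · rw [if_neg h2, if_neg (fun hc => h2 (c80.mp hc))]
          by_cases h3 : 60 ∈ S.map tierOf
          · rw [if_pos h3, if_pos (c60.mpr h3)]
          · rw [if_neg h3, if_neg (fun hc => h3 (c60.mp hc))]
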